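-- pv_equiv track=rewrite | github.com/Choe-Ji-Hwan/Coding-Test-Practice | dp/백준 2240 자두나무.py | solution
-- ===== SOURCE A (Python) =====
-- def solution(drop, t, w):
--     drop = [0] + drop
--     # 2차원 배열, [시간][w 사용 수]
--     dp = [[0 for _ in range(w + 1)] for _ in range(t + 1)]
--
--     # 1초 때,
--     dp[1][0] = 1 if drop[1] == 1 else 0     # 초기 위치 1번이라, 1번에 떨어질 때 점수
--     dp[1][1] = 1 if drop[1] == 2 else 0     # w=1로, 2로 이동. 2번에 떨어질 때 점수.
--
--     # w 짝수면 1위치, 홀수면 2위치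
--     for i in range(2, t + 1):
--         for j in range(w + 1):
--             if j % 2 == 0:
--                 # 만약, j가 현재 9 / i-1일 때 j를 0~10까지 확인했을 때 j가 5일 때 였다면,
--                 # 6, 7, 8 이동했을 때가 아닌, 5번 이동하고 6번째다. j가 9지만. 6번 이동했을 때.
--                 dp[i][j] = max(dp[i - 1][0: j + 1]) + (1 if drop[i] == 1 else 0)
--             else:
--                 dp[i][j] = max(dp[i - 1][0: j + 1]) + (1 if drop[i] == 2 else 0)
--
--     return max(dp[t])
-- ===== SOURCE B (Python) =====
-- def solution(drop, t, w):
--     # O(t*w): keep one row and a running prefix maximum instead of slicing max for each j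
--     d = [0] + drop
--     row = [0] * (w + 1)
--     row[0] = 1 if d[1] == 1 else 0
--     row[1] = 1 if d[1] == 2 else 0
--     for i in range(2, t + 1):
--         new = []
--         best = None
--         j = 0
--         for x in row:
--             best = x if best is None or x > best else best
--             new.append(best + (1 if d[i] == (1 if j % 2 == 0 else 2) else 0))
--             j += 1
--         row = new
--     return max(row)
-- ===== Notes on version B (the rewrite author's own statement) =====
-- stated objective: faster
-- what changed: Replaces the (t+1)x(w+1) table whose every cell takes max over a slice of the previous row with a single row updated in one pass per second using a running prefix maximum.
import Mathlib
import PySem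

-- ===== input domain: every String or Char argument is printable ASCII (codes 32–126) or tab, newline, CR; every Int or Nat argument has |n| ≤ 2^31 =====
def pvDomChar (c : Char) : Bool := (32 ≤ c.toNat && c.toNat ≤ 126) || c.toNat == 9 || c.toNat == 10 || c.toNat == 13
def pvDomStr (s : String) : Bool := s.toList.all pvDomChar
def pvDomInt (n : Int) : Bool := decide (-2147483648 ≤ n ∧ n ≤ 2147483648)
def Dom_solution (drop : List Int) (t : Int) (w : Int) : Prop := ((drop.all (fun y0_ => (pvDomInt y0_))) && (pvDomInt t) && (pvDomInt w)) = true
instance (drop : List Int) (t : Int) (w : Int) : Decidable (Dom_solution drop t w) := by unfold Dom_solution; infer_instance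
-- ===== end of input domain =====

-- B replaces A's per-cell max over a slice of the previous row by a single running prefix-maximum pass per row (O(t*w) vs O(t*w^2)).


-- ===== PORT A =====
-- max(xs): Python raises on []; the .getD 0 default is only reached outside Pre_solution
def pyMaxI (xs : List Int) : Int := (PySem.List.max? xs (fun x => x)).getD 0

def solution (drop : List Int) (t : Int) (w : Int) : Int :=
  let drop : List Int := (0 : Int) :: drop
  let dp : List (List Int) :=
    (PySem.List.pyRange 0 (t + 1) 1).map (fun _ =>
      (PySem.List.pyRange 0 (w + 1) 1).map (fun _ => (0 : Int)))
  -- dp[1][0] / dp[1][1] assignments (indices in range under Pre_solution)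
  let dp := dp.set 1
    (((dp.getD 1 []).set 0 (if PySem.List.pyGetD drop 1 0 = 1 then 1 else 0)).set 1
      (if PySem.List.pyGetD drop 1 0 = 2 then 1 else 0))
  let dp := (PySem.List.pyRange 2 (t + 1) 1).foldl (fun dp i =>
    (PySem.List.pyRange 0 (w + 1) 1).foldl (fun dp j =>
      dp.set i.toNat ((dp.getD i.toNat []).set j.toNat
        (if PySem.Int.mod j 2 = 0 then
          pyMaxI (PySem.List.slice (dp.getD (i - 1).toNat []) (some 0) (some (j + 1)))
            + (if PySem.List.pyGetD drop i 0 = 1 then 1 else 0)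
        else
          pyMaxI (PySem.List.slice (dp.getD (i - 1).toNat []) (some 0) (some (j + 1)))
            + (if PySem.List.pyGetD drop i 0 = 2 then 1 else 0)))) dp) dp
  pyMaxI (dp.getD t.toNat [])

-- ===== PORT B =====
def solution_alt (drop : List Int) (t : Int) (w : Int) : Int :=
  let d : List Int := (0 : Int) :: drop
  let row : List Int := PySem.List.pyRepeat [(0 : Int)] (w + 1)
  let row := (row.set 0 (if PySem.List.pyGetD d 1 0 = 1 then 1 else 0)).set 1
    (if PySem.List.pyGetD d 1 0 = 2 then 1 else 0)
  let row := (PySem.List.pyRange 2 (t + 1) 1).foldl (fun row i =>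
    (row.foldl (fun (st : Option Int × Int × List Int) x =>
      let best : Int := match st.1 with
        | none => x
        | some b => if x > b then x else b
      (some best, st.2.1 + 1,
        st.2.2 ++ [best + (if PySem.List.pyGetD d i 0 = (if PySem.Int.mod st.2.1 2 = 0 then 1 else 2) then 1 else 0)]))
      ((none : Option Int), (0 : Int), ([] : List Int))).2.2) row
  (PySem.List.max? row (fun x => x)).getD 0

-- ===== PRECONDITION & SPEC =====
-- Pre: exactly where A returns: t ≥ 1 and w ≥ 1 (else dp[1][0]/dp[1][1] raise IndexError) and len(drop) ≥ t (else drop[i] raises)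
def Pre_solution (drop : List Int) (t : Int) (w : Int) : Prop :=
  1 ≤ t ∧ 1 ≤ w ∧ t ≤ (drop.length : Int)
instance (drop : List Int) (t : Int) (w : Int) : Decidable (Pre_solution drop t w) := by
  unfold Pre_solution; infer_instance

def pvWitness_solution : List Int × Int × Int := ([1, 2, 1], 3, 2)

def Spec_solution (drop : List Int) (t : Int) (w : Int) (out : Int) : Prop := out = solution_alt drop t w
instance (drop : List Int) (t : Int) (w : Int) (out : Int) : Decidable (Spec_solution drop t w out) := by unfold Spec_solution; infer_instance

-- ===== CLAIM (what is proved, stated in full; the proofs are below) =====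
def Claim_equal_solution : Prop := ∀ (drop : List Int) (t : Int) (w : Int), Dom_solution drop t w → Pre_solution drop t w → Spec_solution drop t w (solution drop t w)

-- ===== LEMMAS AND PROOFS =====

-- the per-catch bonus: +1 iff drop[i] matches the position determined by parity of moves j
def pvBonus (di j : Int) : Int :=
  if di = (if PySem.Int.mod j 2 = 0 then 1 else 2) then 1 else 0

-- reference description of one DP row update: running prefix maximum b, move counter j
def pvSpecRow (di : Int) : Int → Int → List Int → List Int
  | _, _, [] => []
  | b, j, x :: xs => (max b x + pvBonus di j) :: pvSpecRow di (max b x) (j + 1) xs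

-- B's inner loop body, named (definitionally the lambda in solution_alt)
def pvBF (di : Int) (st : Option Int × Int × List Int) (x : Int) : Option Int × Int × List Int :=
  let best : Int := match st.1 with
    | none => x
    | some b => if x > b then x else b
  (some best, st.2.1 + 1,
    st.2.2 ++ [best + (if di = (if PySem.Int.mod st.2.1 2 = 0 then 1 else 2) then 1 else 0)])

lemma pvMax_if (b x : Int) : (if x > b then x else b) = max b x := by
  simp only [max_def]; split_ifs <;> omega

lemma pvBF_fold (di : Int) : ∀ (xs : List Int) (b j : Int) (acc : List Int),
    xs.foldl (pvBF di) (some b, j, acc)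
      = (some (xs.foldl max b), j + xs.length, acc ++ pvSpecRow di b j xs) := by
  intro xs
  induction xs with
  | nil => intro b j acc; simp [pvSpecRow]
  | cons x xs ih =>
    intro b j acc
    show xs.foldl (pvBF di) (pvBF di (some b, j, acc) x) = _
    rw [show pvBF di (some b, j, acc) x
        = (some (max b x), j + 1, acc ++ [max b x + pvBonus di j]) by
      simp [pvBF, pvMax_if, pvBonus]]
    rw [ih]
    refine Prod.ext rfl (Prod.ext ?_ ?_) <;> simp [pvSpecRow]
    ring

lemma pvSpecRow_eq (di : Int) : ∀ (xs : List Int) (b j : Int),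
    pvSpecRow di b j xs
      = (List.range xs.length).map
          (fun k => ((xs.take (k + 1)).foldl max b) + pvBonus di (j + (k : Int))) := by
  intro xs
  induction xs with
  | nil => intro b j; simp [pvSpecRow]
  | cons x xs ih =>
    intro b j
    rw [pvSpecRow, ih (max b x) (j + 1)]
    simp only [List.length_cons, List.range_succ_eq_map, List.map_cons, List.map_map]
    refine List.cons_eq_cons.mpr ⟨by simp, ?_⟩
    apply List.map_congr_left
    intro k _
    simp only [Function.comp_apply, List.take_succ_cons, List.foldl_cons]
    rw [show j + 1 + (k : Int) = j + ((Nat.succ k : Nat) : Int) by push_cast; ring]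

lemma pvCell_eq (di x : Int) (xs : List Int) (k : Nat) :
    (if PySem.Int.mod ((k : Nat) : Int) 2 = 0 then
        pyMaxI (PySem.List.slice (x :: xs) (some 0) (some (((k : Nat) : Int) + 1))) + (if di = 1 then 1 else 0)
      else
        pyMaxI (PySem.List.slice (x :: xs) (some 0) (some (((k : Nat) : Int) + 1))) + (if di = 2 then 1 else 0))
    = ((x :: xs).take (k + 1)).foldl max x + pvBonus di ((k : Nat) : Int) := by
  have hsl : PySem.List.slice (x :: xs) (some 0) (some (((k : Nat) : Int) + 1)) = (x :: xs).take (k + 1) := by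
    rw [show (((k : Nat) : Int) + 1) = ((k + 1 : Nat) : Int) by push_cast; ring]
    rw [PySem.List.slice_zero_start, PySem.List.slice_to_natCast]
  have hm : pyMaxI ((x :: xs).take (k + 1)) = ((x :: xs).take (k + 1)).foldl max x := by
    rw [List.take_succ_cons]
    simp [pyMaxI, PySem.List.max?_id_cons]
  rw [hsl, hm]
  simp only [pvBonus]
  split_ifs <;> simp_all

lemma pvSet_getD {α : Type} (l : List α) (m : Nat) (d : α) (h : m < l.length) :
    l.set m (l.getD m d) = l := by
  simp [List.getD, List.getElem?_eq_getElem h]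

lemma pvGetD_set_ne {α : Type} (l : List α) (m k : Nat) (x : α) (d : α) (h : k ≠ m) :
    (l.set m x).getD k d = l.getD k d := by
  simp [List.getD, List.getElem?_set_ne (Ne.symm h)]

lemma pvGetD_set_self {α : Type} (l : List α) (m : Nat) (x : α) (d : α) (h : m < l.length) :
    (l.set m x).getD m d = x := by
  simp [List.getD, h]

lemma pvA_innerDP (i : Int) (hi : 1 ≤ i) (F : List Int → Int → Int) :
    ∀ (n : Nat) (dp : List (List Int)), i.toNat < dp.length → n ≤ (dp.getD i.toNat []).length →
    (PySem.List.pyRange 0 ((n : Nat) : Int) 1).foldl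
        (fun dp j => dp.set i.toNat ((dp.getD i.toNat []).set j.toNat (F (dp.getD (i - 1).toNat []) j))) dp
      = dp.set i.toNat (((List.range n).map (fun k => F (dp.getD (i - 1).toNat []) ((k : Nat) : Int)))
          ++ (dp.getD i.toNat []).drop n) := by
  intro n
  induction n with
  | zero =>
    intro dp hlt _
    simpa using (pvSet_getD dp i.toNat [] hlt).symm
  | succ n ih =>
    intro dp hlt hle
    have hne : (i - 1).toNat ≠ i.toNat := by omega
    rw [show (((n + 1 : Nat)) : Int) = ((n : Nat) : Int) + 1 by push_cast; ring]
    rw [PySem.List.pyRange_one_succ_right (by positivity)]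
    rw [List.foldl_append, ih dp hlt (by omega), List.foldl_cons, List.foldl_nil]
    rw [List.set_set]
    congr 1
    rw [pvGetD_set_self _ _ _ _ hlt, pvGetD_set_ne _ _ _ _ _ hne]
    rw [Int.toNat_natCast]
    have hPlen : ((List.range n).map (fun k => F (dp.getD (i - 1).toNat []) ((k : Nat) : Int))).length = n := by
      simp
    rw [show (((List.range n).map (fun k => F (dp.getD (i - 1).toNat []) ((k : Nat) : Int)))
          ++ (dp.getD i.toNat []).drop n).set n (F (dp.getD (i - 1).toNat []) ((n : Nat) : Int))
        = ((List.range n).map (fun k => F (dp.getD (i - 1).toNat []) ((k : Nat) : Int)))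
          ++ ((dp.getD i.toNat []).drop n).set 0 (F (dp.getD (i - 1).toNat []) ((n : Nat) : Int)) from by
      rw [← hPlen]; simp]
    simp only [List.range_succ, List.map_append, List.map_cons, List.map_nil, List.append_assoc,
      List.cons_append, List.nil_append]
    congr 1
    rw [List.drop_eq_getElem_cons (show n < (dp.getD i.toNat []).length by omega),
      List.set_cons_zero]

lemma pvB_step (di x : Int) (xs : List Int) :
    ((x :: xs).foldl (pvBF di) ((none : Option Int), (0 : Int), ([] : List Int))).2.2
      = (List.range (x :: xs).length).map
          (fun k => (((x :: xs).take (k + 1)).foldl max x) + pvBonus di ((k : Nat) : Int)) := by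
  rw [List.foldl_cons]
  rw [show pvBF di (none, 0, []) x = (some x, 1, [x + pvBonus di 0]) by simp [pvBF, pvBonus]]
  rw [pvBF_fold]
  rw [List.singleton_append]
  have h := pvSpecRow_eq di (x :: xs) x 0
  rw [pvSpecRow] at h
  simp only [max_self, zero_add] at h
  exact h

lemma pvOuter (drop0 : List Int) (t w : Int) (hw : 1 ≤ w) (W : Nat) (hW : w + 1 = (W : Int)) :
    ∀ (n : Nat) (i₀ : Int) (dp : List (List Int)) (row : List Int),
      (t + 1 - i₀).toNat = n → 2 ≤ i₀ → i₀ ≤ t + 1 →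
      dp.length = (t + 1).toNat →
      (∀ k, k < dp.length → (dp.getD k []).length = W) →
      dp.getD (i₀ - 1).toNat [] = row →
      ((PySem.List.pyRange i₀ (t + 1) 1).foldl
          (fun dp i => (PySem.List.pyRange 0 (w + 1) 1).foldl (fun dp j =>
            dp.set i.toNat ((dp.getD i.toNat []).set j.toNat
              (if PySem.Int.mod j 2 = 0 then
                pyMaxI (PySem.List.slice (dp.getD (i - 1).toNat []) (some 0) (some (j + 1)))
                  + (if PySem.List.pyGetD drop0 i 0 = 1 then 1 else 0)
              else
                pyMaxI (PySem.List.slice (dp.getD (i - 1).toNat []) (some 0) (some (j + 1)))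
                  + (if PySem.List.pyGetD drop0 i 0 = 2 then 1 else 0)))) dp) dp).getD t.toNat []
        = (PySem.List.pyRange i₀ (t + 1) 1).foldl
            (fun row i => (row.foldl (pvBF (PySem.List.pyGetD drop0 i 0))
              ((none : Option Int), (0 : Int), ([] : List Int))).2.2) row := by
  intro n
  induction n with
  | zero =>
    intro i₀ dp row hfuel h2 hle hlen hrows hrow
    have hi : i₀ = t + 1 := by omega
    subst hi
    rw [PySem.List.pyRange_one_eq_nil (le_refl _)]
    simp only [List.foldl_nil]
    simpa using hrow
  | succ n ih =>
    intro i₀ dp row hfuel h2 hle hlen hrows hrow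
    have hW2 : 2 ≤ W := by omega
    have hlt : i₀ < t + 1 := by omega
    rw [PySem.List.pyRange_one_cons hlt, List.foldl_cons, List.foldl_cons]
    have hiW : i₀.toNat < dp.length := by omega
    have hrowlen : row.length = W := by
      rw [← hrow]; exact hrows _ (by omega)
    obtain ⟨x, xs, rfl⟩ : ∃ x xs, row = x :: xs := by
      cases row with
      | nil => exfalso; simp at hrowlen; omega
      | cons a l => exact ⟨a, l, rfl⟩
    have hA := pvA_innerDP i₀ (by omega)
      (fun prev j =>
        if PySem.Int.mod j 2 = 0 then
          pyMaxI (PySem.List.slice prev (some 0) (some (j + 1)))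
            + (if PySem.List.pyGetD drop0 i₀ 0 = 1 then 1 else 0)
        else
          pyMaxI (PySem.List.slice prev (some 0) (some (j + 1)))
            + (if PySem.List.pyGetD drop0 i₀ 0 = 2 then 1 else 0))
      W dp hiW (le_of_eq (hrows _ hiW).symm)
    rw [← hW] at hA
    rw [hA]
    rw [List.drop_eq_nil_of_le (le_of_eq (hrows _ hiW)), List.append_nil]
    rw [hrow]
    have hcell : (List.range W).map
        (fun k => (fun prev j =>
          if PySem.Int.mod j 2 = 0 then
            pyMaxI (PySem.List.slice prev (some 0) (some (j + 1)))
              + (if PySem.List.pyGetD drop0 i₀ 0 = 1 then 1 else 0)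
          else
            pyMaxI (PySem.List.slice prev (some 0) (some (j + 1)))
              + (if PySem.List.pyGetD drop0 i₀ 0 = 2 then 1 else 0)) (x :: xs) ((k : Nat) : Int))
        = (List.range W).map
            (fun k => (((x :: xs).take (k + 1)).foldl max x)
              + pvBonus (PySem.List.pyGetD drop0 i₀ 0) ((k : Nat) : Int)) := by
      apply List.map_congr_left
      intro k _
      exact pvCell_eq (PySem.List.pyGetD drop0 i₀ 0) x xs k
    have hB : ((x :: xs).foldl (pvBF (PySem.List.pyGetD drop0 i₀ 0))
        ((none : Option Int), (0 : Int), ([] : List Int))).2.2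
        = (List.range W).map
            (fun k => (((x :: xs).take (k + 1)).foldl max x)
              + pvBonus (PySem.List.pyGetD drop0 i₀ 0) ((k : Nat) : Int)) := by
      rw [pvB_step]
      have : (x :: xs).length = W := hrowlen
      rw [this]
    rw [hcell, hB]
    apply ih
    · omega
    · omega
    · omega
    · simp [hlen]
    · intro k hk
      simp only [List.length_set] at hk
      by_cases hki : k = i₀.toNat
      · subst hki
        rw [pvGetD_set_self _ _ _ _ hiW]
        simp
      · rw [pvGetD_set_ne _ _ _ _ _ hki]
        exact hrows _ hk
    · rw [show i₀ + 1 - 1 = i₀ by ring]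
      exact pvGetD_set_self _ _ _ _ hiW

-- ===== VERDICT (by name: the statement is the Claim_ definition above) =====
theorem solution_spec : Claim_equal_solution := by
  unfold Claim_equal_solution
  intro drop t w _ hpre
  obtain ⟨ht, hw, hlend⟩ := hpre
  unfold Spec_solution solution solution_alt
  have hW : w + 1 = (((w + 1).toNat : Nat) : Int) := by omega
  have hzr : PySem.List.pyRepeat [(0 : Int)] (w + 1)
      = (PySem.List.pyRange 0 (w + 1) 1).map (fun _ => (0 : Int)) := by
    rw [PySem.List.pyRepeat_singleton, List.map_const', PySem.List.length_pyRange_one]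
    simp
  rw [hzr]
  have hzrlen : ((PySem.List.pyRange 0 (w + 1) 1).map (fun _ => (0 : Int))).length = (w + 1).toNat := by
    simp [PySem.List.length_pyRange_one]
  exact congrArg pyMaxI (pvOuter ((0 : Int) :: drop) t w hw (w + 1).toNat hW
    (t + 1 - 2).toNat 2 _ _ rfl (by omega) (by omega)
    (by simp only [List.length_set, List.length_map, PySem.List.length_pyRange_one]; omega)
    (by
      intro k hk
      simp only [List.length_set, List.length_map, PySem.List.length_pyRange_one] at hk
      by_cases hk1 : k = 1
      · subst hk1
        rw [pvGetD_set_self _ _ _ _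
          (by simp only [List.length_map, PySem.List.length_pyRange_one]; omega)]
        simp only [List.length_set]
        rw [List.getD_eq_getElem _ _
          (by simp only [List.length_map, PySem.List.length_pyRange_one]; omega)]
        simp only [List.getElem_map, List.length_map, PySem.List.length_pyRange_one]
        omega
      · rw [pvGetD_set_ne _ _ _ _ _ hk1]
        rw [List.getD_eq_getElem _ _
          (by simp only [List.length_map, PySem.List.length_pyRange_one]; omega)]
        simp only [List.getElem_map, List.length_map, PySem.List.length_pyRange_one]
        omega)
    (by
      rw [show ((2 : Int) - 1).toNat = 1 by norm_num]
      have h1len : (1 : Nat) < ((PySem.List.pyRange 0 (t + 1) 1).map (fun _ =>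
          (PySem.List.pyRange 0 (w + 1) 1).map (fun _ => (0 : Int)))).length := by
        simp only [List.length_map, PySem.List.length_pyRange_one]; omega
      rw [pvGetD_set_self _ _ _ _ h1len]
      rw [List.getD_eq_getElem _ _ h1len]
      simp only [List.getElem_map]))
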